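-- pv_equiv track=rewrite | github.com/SoTeriyaki/truflops | nest/grid.py | generate_grid_nest
-- ===== SOURCE A (Python) =====
-- SHEET_WIDTH = 3000
--
-- SHEET_HEIGHT = 1500
--
-- SCRAP = 20
--
-- SPACING = 5
--
-- def generate_grid_nest(bbox, quantity):
--
--     part_w = bbox["width"]
--     part_h = bbox["height"]
--
--     pitch_x = part_w + SPACING
--     pitch_y = part_h + SPACING
--
--     usable_w = SHEET_WIDTH - SCRAP
--     usable_h = SHEET_HEIGHT - SCRAP
--
--     cols = int(usable_w // pitch_x)
--     rows = int(usable_h // pitch_y)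
--
--     placements = []
--     count = 0
--
--     # NAJPIERW kolumna (X)
--     for c in range(cols):
--
--         # potem w górę (Y)
--         for r in range(rows):
--
--             if count >= quantity:
--                 return placements
--
--             x = SCRAP + c * pitch_x
--             y = SCRAP + r * pitch_y
--
--             placements.append({
--                 "x": x,
--                 "y": y
--             })
--
--             count += 1
--
--     return placements
-- ===== SOURCE B (Python) =====
-- SHEET_WIDTH = 3000
--
-- SHEET_HEIGHT = 1500
--
-- SCRAP = 20
--
-- SPACING = 5
--
-- def generate_grid_nest(bbox, quantity):
--     pitch_x = bbox["width"] + SPACING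
--     pitch_y = bbox["height"] + SPACING
--
--     cols = max(int((SHEET_WIDTH - SCRAP) // pitch_x), 0)
--     rows = max(int((SHEET_HEIGHT - SCRAP) // pitch_y), 0)
--
--     # closed-form count of placed parts, then split into full columns + remainder
--     n = max(min(cols * rows, quantity), 0)
--     q, r = divmod(n, rows) if rows else (0, 0)
--
--     # one precomputed strip of y-offsets, reused for every column
--     ys = [SCRAP + ri * pitch_y for ri in range(rows)]
--
--     placements = []
--     for c in range(q):
--         x = SCRAP + c * pitch_x
--         placements.extend({"x": x, "y": y} for y in ys)
--
--     x = SCRAP + q * pitch_x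
--     placements.extend({"x": x, "y": y} for y in ys[:r])
--     return placements
-- ===== Notes on version B (the rewrite author's own statement) =====
-- stated objective: alternative
-- what changed: Instead of A's nested loops with an incrementing counter and an early return, B computes the number of placements in closed form (n = max(min(cols*rows, quantity), 0)), splits it by divmod into q full columns plus an r-item remainder column, and builds the output from a single precomputed strip of y-offsets reused per column.
import Mathlib
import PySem

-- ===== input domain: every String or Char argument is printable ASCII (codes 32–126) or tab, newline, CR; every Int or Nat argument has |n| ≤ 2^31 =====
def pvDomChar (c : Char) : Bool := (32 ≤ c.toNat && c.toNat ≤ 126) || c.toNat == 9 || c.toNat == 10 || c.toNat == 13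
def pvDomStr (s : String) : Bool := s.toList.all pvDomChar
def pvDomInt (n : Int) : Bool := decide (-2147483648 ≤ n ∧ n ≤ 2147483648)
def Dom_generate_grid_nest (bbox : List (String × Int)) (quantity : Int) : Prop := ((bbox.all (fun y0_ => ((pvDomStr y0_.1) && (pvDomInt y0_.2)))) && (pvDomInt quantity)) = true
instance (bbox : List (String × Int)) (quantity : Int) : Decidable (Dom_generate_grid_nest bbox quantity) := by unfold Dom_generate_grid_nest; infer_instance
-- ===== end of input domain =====

-- B replaces A's counter-and-early-return nested loops by a closed-form placement count split by divmod into full columns plus a remainder, built from one precomputed y-strip; same cost, different decomposition.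


-- ===== PORT A =====
-- inner 'for r in range(rows)' loop: returns (placements, count, early-returned?)
def nestInner (pitch_x pitch_y quantity c : Int) :
    List Int → List (List (String × Int)) → Int → List (List (String × Int)) × Int × Bool
  | [], acc, count => (acc, count, false)
  | r :: rs, acc, count =>
    if count ≥ quantity then (acc, count, true)
    else nestInner pitch_x pitch_y quantity c rs
      (acc ++ [[("x", 20 + c * pitch_x), ("y", 20 + r * pitch_y)]]) (count + 1)

-- outer 'for c in range(cols)' loop
def nestOuter (pitch_x pitch_y rows quantity : Int) :
    List Int → List (List (String × Int)) → Int → List (List (String × Int))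
  | [], acc, _ => acc
  | c :: cs, acc, count =>
    match nestInner pitch_x pitch_y quantity c (PySem.List.pyRange 0 rows 1) acc count with
    | (acc', count', early) =>
      if early then acc' else nestOuter pitch_x pitch_y rows quantity cs acc' count'

def generate_grid_nest (bbox : List (String × Int)) (quantity : Int) : List (List (String × Int)) :=
  match (PySem.Dict.mk bbox).get? "width", (PySem.Dict.mk bbox).get? "height" with
  | some part_w, some part_h =>
    let pitch_x := part_w + 5
    let pitch_y := part_h + 5
    let usable_w : Int := 3000 - 20
    let usable_h : Int := 1500 - 20
    let cols := PySem.Int.floordiv usable_w pitch_x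
    let rows := PySem.Int.floordiv usable_h pitch_y
    nestOuter pitch_x pitch_y rows quantity (PySem.List.pyRange 0 cols 1) [] 0
  | _, _ => []   -- KeyError in Python: excluded by Pre_

-- ===== PORT B =====
def generate_grid_nest_alt (bbox : List (String × Int)) (quantity : Int) : List (List (String × Int)) :=
  match (PySem.Dict.mk bbox).get? "width" with
  | none => []   -- KeyError in Python: excluded by Pre_
  | some w =>
  match (PySem.Dict.mk bbox).get? "height" with
  | none => []   -- KeyError in Python: excluded by Pre_
  | some h =>
    let pitch_x := w + 5
    let pitch_y := h + 5
    let cols := max (PySem.Int.floordiv (3000 - 20) pitch_x) 0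
    let rows := max (PySem.Int.floordiv (1500 - 20) pitch_y) 0
    -- closed-form count, split into q full columns and an r-item remainder
    let n := max (min (cols * rows) quantity) 0
    let q := if rows = 0 then 0 else PySem.Int.floordiv n rows
    let r := if rows = 0 then 0 else PySem.Int.mod n rows
    -- one precomputed strip of y-offsets, reused for every column
    let ys := (PySem.List.pyRange 0 rows 1).map (fun ri => 20 + ri * pitch_y)
    let full := (PySem.List.pyRange 0 q 1).foldl
      (fun acc c => acc ++ ys.map (fun y => [("x", 20 + c * pitch_x), ("y", y)])) []
    full ++ (PySem.List.slice ys (some 0) (some r)).map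
      (fun y => [("x", 20 + q * pitch_x), ("y", y)])

-- ===== PRECONDITION & SPEC =====
-- Pre_ excludes exactly the inputs on which A raises: a missing "width"/"height" key (KeyError)
-- and a part width or height of -5, which makes a pitch zero (ZeroDivisionError).
def Pre_generate_grid_nest (bbox : List (String × Int)) (quantity : Int) : Prop :=
  (PySem.Dict.mk bbox).get? "width" ≠ none ∧ (PySem.Dict.mk bbox).get? "height" ≠ none ∧
  (PySem.Dict.mk bbox).get? "width" ≠ some (-5) ∧ (PySem.Dict.mk bbox).get? "height" ≠ some (-5)
instance (bbox : List (String × Int)) (quantity : Int) : Decidable (Pre_generate_grid_nest bbox quantity) := by unfold Pre_generate_grid_nest; infer_instance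

def pvWitness_generate_grid_nest : (List (String × Int)) × Int := ([("width", 1000), ("height", 700)], 5)

def Spec_generate_grid_nest (bbox : List (String × Int)) (quantity : Int) (out : List (List (String × Int))) : Prop := out = generate_grid_nest_alt bbox quantity
instance (bbox : List (String × Int)) (quantity : Int) (out : List (List (String × Int))) : Decidable (Spec_generate_grid_nest bbox quantity out) := by unfold Spec_generate_grid_nest; infer_instance

-- ===== CLAIM (what is proved, stated in full; the proofs are below) =====
def Claim_equal_generate_grid_nest : Prop := ∀ (bbox : List (String × Int)) (quantity : Int), Dom_generate_grid_nest bbox quantity → Pre_generate_grid_nest bbox quantity → Spec_generate_grid_nest bbox quantity (generate_grid_nest bbox quantity)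

-- ===== LEMMAS AND PROOFS =====

-- the item placed at linear index j (column-major, j = c * rows + r)
def gItem (pitch_x pitch_y rows j : Int) : List (String × Int) :=
  [("x", 20 + PySem.Int.floordiv j rows * pitch_x), ("y", 20 + PySem.Int.mod j rows * pitch_y)]

-- the first t items of column c's strip are the linear segment [c*rows, c*rows + t)
lemma strip_linear (px py rows c : Int) (hrows : 0 < rows) (t : Int) (ht0 : 0 ≤ t) (htr : t ≤ rows) :
    ((PySem.List.pyRange 0 rows 1).map
        (fun r => [("x", 20 + c * px), ("y", 20 + r * py)])).take t.toNat
      = (PySem.List.pyRange (c * rows) (c * rows + t) 1).map (gItem px py rows) := by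
  rw [PySem.List.pyRange_one 0 rows, PySem.List.pyRange_one (c * rows) (c * rows + t)]
  simp only [List.map_map, ← List.map_take, List.take_range, add_sub_cancel_left, sub_zero]
  have hmin : min t.toNat rows.toNat = t.toNat := by omega
  rw [hmin]
  apply List.map_congr_left
  intro a ha
  have ha' : (a : Int) < t := by
    have := List.mem_range.mp ha
    omega
  have ha0 : (0 : Int) ≤ (a : Int) := Int.natCast_nonneg a
  simp only [Function.comp, zero_add, gItem]
  have hdiv : PySem.Int.floordiv (c * rows + a) rows = c := by
    rw [PySem.Int.floordiv_eq_ediv_of_pos hrows]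
    rw [show c * rows + (a : Int) = (a : Int) + c * rows by ring,
      Int.add_mul_ediv_right _ _ (by omega)]
    rw [Int.ediv_eq_zero_of_lt ha0 (by omega)]; ring
  have hmod : PySem.Int.mod (c * rows + a) rows = a := by
    rw [PySem.Int.mod_eq_emod_of_pos hrows]
    rw [show c * rows + (a : Int) = (a : Int) + rows * c by ring, Int.add_mul_emod_self_left]
    exact Int.emod_eq_of_lt ha0 (by omega)
  rw [hdiv, hmod]

lemma strip_linear_full (px py rows c : Int) (hrows : 0 < rows) :
    (PySem.List.pyRange 0 rows 1).map (fun r => [("x", 20 + c * px), ("y", 20 + r * py)])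
      = (PySem.List.pyRange (c * rows) (c * rows + rows) 1).map (gItem px py rows) := by
  have h := strip_linear px py rows c hrows rows (le_of_lt hrows) le_rfl
  rwa [List.take_of_length_le (by
    simp only [List.length_map, PySem.List.length_pyRange_one]; omega)] at h

lemma nestInner_eq (px py q c : Int) (rs : List Int) :
    ∀ (acc : List (List (String × Int))) (count : Int),
    nestInner px py q c rs acc count =
      (acc ++ ((rs.take (min rs.length (q - count).toNat)).map
          (fun r => [("x", 20 + c * px), ("y", 20 + r * py)])),
        count + (min rs.length (q - count).toNat : Nat),
        decide (min rs.length (q - count).toNat < rs.length)) := by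
  induction rs with
  | nil => intro acc count; simp [nestInner]
  | cons r rs ih =>
    intro acc count
    rw [nestInner]
    by_cases h : count ≥ q
    · rw [if_pos h]
      have : (q - count).toNat = 0 := by omega
      simp [this]
    · rw [if_neg h, ih]
      have h1 : min (r :: rs).length (q - count).toNat
          = min rs.length (q - (count + 1)).toNat + 1 := by
        simp only [List.length_cons]; omega
      rw [h1]
      simp only [List.take_succ_cons, List.map_cons, List.append_assoc,
        List.singleton_append, List.length_cons, Prod.mk.injEq, decide_eq_decide]
      and_intros <;> first | trivial | omega

lemma nestOuter_eq (px py rows q : Int) (cs : List Int) :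
    ∀ (acc : List (List (String × Int))) (count : Int),
    nestOuter px py rows q cs acc count =
      acc ++ (cs.flatMap (fun c => (PySem.List.pyRange 0 rows 1).map
          (fun r => [("x", 20 + c * px), ("y", 20 + r * py)]))).take (q - count).toNat := by
  induction cs with
  | nil => intro acc count; simp [nestOuter]
  | cons c cs ih =>
    intro acc count
    rw [nestOuter, nestInner_eq]
    simp only []
    set R := (PySem.List.pyRange 0 rows 1) with hR
    set k := min R.length (q - count).toNat with hk
    by_cases h : k < R.length
    · rw [if_pos (by simp [h])]
      rw [List.flatMap_cons, List.take_append]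
      have hmap : (R.map (fun r => [("x", 20 + c * px), ("y", 20 + r * py)])).take (q - count).toNat
          = (R.take k).map (fun r => [("x", 20 + c * px), ("y", 20 + r * py)]) := by
        rw [← List.map_take]
        congr 1
        rw [List.take_eq_take_iff]
        simp [hk]; omega
      have hz : (q - count).toNat - (R.map (fun r => [("x", 20 + c * px), ("y", 20 + r * py)])).length = 0 := by
        simp only [List.length_map]; omega
      rw [hmap, hz]
      simp
    · rw [if_neg (by simp [h])]
      rw [ih, List.flatMap_cons, List.take_append, List.append_assoc]
      have hkR : k = R.length := by omega
      have hmap : (R.map (fun r => [("x", 20 + c * px), ("y", 20 + r * py)])).take (q - count).toNat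
          = (R.take k).map (fun r => [("x", 20 + c * px), ("y", 20 + r * py)]) := by
        rw [← List.map_take, hkR, List.take_length]
        congr 1
        exact List.take_of_length_le (by omega)
      have harith : (q - (count + ↑R.length)).toNat
          = (q - count).toNat - (R.map (fun r => [("x", 20 + c * px), ("y", 20 + r * py)])).length := by
        simp only [List.length_map]; omega
      rw [hmap, ← harith, hkR, List.take_length]

-- the flattened nested loops ARE the linear-index enumeration (column-major)
lemma flatMap_eq_linear (px py rows : Int) (hrows : 0 < rows) (cols : Int) (hcols : 0 ≤ cols) :
    (PySem.List.pyRange 0 cols 1).flatMap (fun c => (PySem.List.pyRange 0 rows 1).map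
        (fun r => [("x", 20 + c * px), ("y", 20 + r * py)]))
      = (PySem.List.pyRange 0 (cols * rows) 1).map (gItem px py rows) := by
  induction cols, hcols using Int.le_induction with
  | base => simp [PySem.List.pyRange_one_eq_nil]
  | succ c hc ih =>
    rw [PySem.List.pyRange_one_succ_right hc, List.flatMap_append, ih,
      show (c + 1) * rows = c * rows + rows by ring,
      PySem.List.pyRange_one_append 0 (c * rows) (c * rows + rows) (by positivity) (by omega),
      List.map_append]
    congr 1
    simp only [List.flatMap_cons, List.flatMap_nil, List.append_nil]
    exact strip_linear_full px py rows c hrows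

lemma take_pyRange_zero (total : Int) (n : Nat) :
    (PySem.List.pyRange 0 total 1).take n = PySem.List.pyRange 0 (min total n) 1 := by
  rw [PySem.List.pyRange_one 0 total, PySem.List.pyRange_one 0 (min total ↑n),
    ← List.map_take, List.take_range]
  have h : min n (total - 0).toNat = (min total ↑n - 0).toNat := by omega
  rw [h]

-- ===== VERDICT (by name: the statement is the Claim_ definition above) =====
theorem generate_grid_nest_spec : Claim_equal_generate_grid_nest := by
  intro bbox quantity _ hpre
  obtain ⟨hw, hh, hw5, hh5⟩ := hpre
  unfold Spec_generate_grid_nest generate_grid_nest generate_grid_nest_alt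
  cases hgw : (PySem.Dict.mk bbox).get? "width" with
  | none => exact absurd hgw hw
  | some w =>
  cases hgh : (PySem.Dict.mk bbox).get? "height" with
  | none => exact absurd hgh hh
  | some h =>
  simp only []
  rw [nestOuter_eq]
  set px := w + 5 with hpx
  set py := h + 5 with hpy
  set cols0 := PySem.Int.floordiv (3000 - 20) px with hcols0
  set rows0 := PySem.Int.floordiv (1500 - 20) py with hrows0
  by_cases hr : rows0 ≤ 0
  · -- rows ≤ 0: inner range empty on the A side, rows clamps to 0 on the B side
    rw [PySem.List.pyRange_one_eq_nil hr, show max rows0 0 = 0 by omega]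
    rw [if_pos rfl, if_pos rfl]
    simp [PySem.List.slice, List.flatMap]
  · push Not at hr
    have hrne : ¬ max rows0 0 = 0 := by omega
    rw [if_neg hrne, if_neg hrne, show max rows0 0 = rows0 by omega]
    by_cases hc : cols0 < 0
    · -- cols < 0: outer range empty on the A side, cols clamps to 0 on the B side
      rw [PySem.List.pyRange_one_eq_nil (le_of_lt hc), show max cols0 0 = 0 by omega]
      have hn : max (min ((0 : Int) * rows0) quantity) 0 = 0 := by
        rw [zero_mul]; omega
      rw [hn]
      have hq0 : PySem.Int.floordiv 0 rows0 = 0 := by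
        rw [PySem.Int.floordiv_eq_ediv_of_pos hr]; simp
      have hr0 : PySem.Int.mod 0 rows0 = 0 := by
        rw [PySem.Int.mod_eq_emod_of_pos hr]; simp
      rw [hq0, hr0]
      simp [PySem.List.slice, PySem.List.pyRange_one_eq_nil (le_refl (0 : Int))]
    · push Not at hc
      rw [show max cols0 0 = cols0 by omega]
      set total := cols0 * rows0 with htotal
      have htot0 : 0 ≤ total := by positivity
      set n := max (min total quantity) 0 with hn
      have hn0 : 0 ≤ n := by omega
      have hntot : n ≤ total := by omega
      clear_value total n
      have hminq : min total ((quantity.toNat : Int)) = n := by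
        rcases le_or_gt quantity 0 with hle | hgt
        · have h1 : (quantity.toNat : Int) = 0 := by omega
          rw [h1, hn]; omega
        · have h1 : (quantity.toNat : Int) = quantity := by omega
          rw [h1, hn]; omega
      set q := PySem.Int.floordiv n rows0 with hq
      set r := PySem.Int.mod n rows0 with hrr
      have hqe : q = n / rows0 := by rw [hq, PySem.Int.floordiv_eq_ediv_of_pos hr]
      have hre : r = n % rows0 := by rw [hrr, PySem.Int.mod_eq_emod_of_pos hr]
      have hr0 : 0 ≤ r := by rw [hre]; exact Int.emod_nonneg n (by omega)
      have hrlt : r < rows0 := by rw [hre]; exact Int.emod_lt_of_pos n hr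
      have hnqr : n = q * rows0 + r := by
        rw [hqe, hre, mul_comm]; exact (Int.ediv_add_emod n rows0).symm
      have hq0 : 0 ≤ q := by rw [hqe]; exact Int.ediv_nonneg hn0 (by omega)
      have hqc : q ≤ cols0 := by
        by_contra hcon
        push Not at hcon
        have : cols0 * rows0 < q * rows0 := by
          apply mul_lt_mul_of_pos_right _ hr; omega
        omega
      clear_value q r
      -- A side: take quantity.toNat of the full flatMap = linear enumeration up to n
      rw [flatMap_eq_linear px py rows0 hr cols0 hc,
        show quantity - 0 = quantity by ring,
        ← List.map_take, ← htotal, take_pyRange_zero total quantity.toNat, hminq]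
      -- B side: full columns + remainder strip = linear enumeration up to n
      rw [PySem.List.foldl_append_eq_flatMap, List.nil_append]
      have hfull : (PySem.List.pyRange 0 q 1).flatMap
          (fun c => ((PySem.List.pyRange 0 rows0 1).map (fun ri => 20 + ri * py)).map
            (fun y => [("x", 20 + c * px), ("y", y)]))
          = (PySem.List.pyRange 0 (q * rows0) 1).map (gItem px py rows0) := by
        rw [← flatMap_eq_linear px py rows0 hr q hq0]
        exact List.flatMap_congr (fun c _ => by simp [List.map_map])
      have hrem : ((PySem.List.slice ((PySem.List.pyRange 0 rows0 1).map (fun ri => 20 + ri * py))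
            (some 0) (some r)).map (fun y => [("x", 20 + q * px), ("y", y)]))
          = (PySem.List.pyRange (q * rows0) (q * rows0 + r) 1).map (gItem px py rows0) := by
        rw [show (PySem.List.slice ((PySem.List.pyRange 0 rows0 1).map (fun ri => 20 + ri * py))
              (some 0) (some r))
            = ((PySem.List.pyRange 0 rows0 1).map (fun ri => 20 + ri * py)).take r.toNat by
          rw [PySem.List.slice_zero_start]; exact PySem.List.slice_to _ hr0]
        rw [← List.map_take, List.map_map,
          show ((fun y => [("x", 20 + q * px), ("y", y)]) ∘ (fun ri => 20 + ri * py))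
            = (fun ri => [("x", 20 + q * px), ("y", 20 + ri * py)]) from rfl,
          List.map_take]
        exact strip_linear px py rows0 q hr r hr0 (le_of_lt hrlt)
      rw [hfull, hrem, List.nil_append, ← List.map_append,
        ← PySem.List.pyRange_one_append 0 (q * rows0) (q * rows0 + r)
          (by nlinarith) (by omega), ← hnqr]
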